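-- pv_equiv track=rewrite | github.com/GustosRepo/medocr | MEDOCR/ocr-worker/flag_rules.py | flags_to_actions
-- ===== SOURCE A (Python) =====
-- from typing import Dict, List, Optional, Any
--
-- def flags_to_actions(flags: List[str], catalog: Dict) -> List[str]:
--     """Map flags to routing actions, de-duplicate and maintain stable order"""
--     actions = []
--     seen = set()
--
--     flag_lookup = {f['id']: f['route'] for f in catalog['flags']}
--
--     for flag_id in flags:
--         if flag_id in flag_lookup:
--             route = flag_lookup[flag_id]
--             if route not in seen:
--                 actions.append(route)
--                 seen.add(route)
--
--     return actions
-- ===== SOURCE B (Python) =====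
-- def flags_to_actions(flags, catalog):
--     """Map flags to routing actions, de-duplicate and maintain stable order.
--
--     Staged decomposition: first resolve the whole flag list to a route list,
--     then de-duplicate it by structural recursion (keep the head, recursively
--     dedup the tail with the head filtered out) -- no running 'seen' set."""
--     lookup = {f['id']: f['route'] for f in catalog['flags']}
--     routes = [lookup[f] for f in flags if f in lookup]
--     return _dedup(routes)
--
-- def _dedup(rs):
--     if not rs:
--         return []
--     head, tail = rs[0], rs[1:]
--     return [head] + [r for r in _dedup(tail) if r != head]
-- ===== Notes on version B (the rewrite author's own statement) =====
-- stated objective: alternative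
-- what changed: B replaces A's single pass with a running seen-set by two stages: a comprehension resolving the whole flag list to a route list, then order-preserving de-duplication by structural recursion (keep head, dedup tail with head filtered out) with no seen set.
import Mathlib
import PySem

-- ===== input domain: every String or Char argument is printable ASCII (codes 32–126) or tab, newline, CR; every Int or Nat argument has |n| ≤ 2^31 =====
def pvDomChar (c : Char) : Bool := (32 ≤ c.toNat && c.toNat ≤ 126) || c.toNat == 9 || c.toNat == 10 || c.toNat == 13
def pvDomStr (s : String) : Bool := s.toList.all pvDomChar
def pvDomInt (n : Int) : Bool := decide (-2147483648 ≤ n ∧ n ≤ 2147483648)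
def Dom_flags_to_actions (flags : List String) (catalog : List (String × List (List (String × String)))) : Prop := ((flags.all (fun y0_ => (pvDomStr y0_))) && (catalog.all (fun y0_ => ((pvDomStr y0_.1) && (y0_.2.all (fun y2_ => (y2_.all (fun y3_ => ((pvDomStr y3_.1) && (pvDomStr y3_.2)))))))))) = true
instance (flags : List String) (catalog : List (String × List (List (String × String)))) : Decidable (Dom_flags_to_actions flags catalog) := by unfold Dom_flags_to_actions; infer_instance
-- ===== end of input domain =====

-- B replaces A's single pass with a seen-set by two stages: resolve all flags to a
-- route list, then de-duplicate it by structural recursion (alternative, not faster).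

-- ===== PORT A =====
-- flag_lookup = {f['id']: f['route'] for f in catalog['flags']}  (dict comprehension = left fold of inserts, last id wins)
-- the getD defaults are never reached under Pre_flags_to_actions (all keys present there; Python raises KeyError otherwise)
def flags_to_actions (flags : List String) (catalog : List (String × List (List (String × String)))) : List String :=
  let catFlags := (PySem.Dict.mk catalog).getD "flags" []
  let flagLookup : PySem.Dict String String :=
    catFlags.foldl (fun d f => d.insert ((PySem.Dict.mk f).getD "id" "") ((PySem.Dict.mk f).getD "route" "")) PySem.Dict.empty
  (flags.foldl (fun (st : List String × PySem.Set String) flagId =>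
      match flagLookup.get? flagId with
      | some route => if PySem.Set.contains st.2 route then st else (st.1 ++ [route], PySem.Set.add st.2 route)
      | none => st)
    ([], PySem.Set.empty)).1

-- ===== PORT B =====
-- _dedup(rs): keep rs[0], recursively dedup rs[1:] and drop the head from it
def pvDedup : List String → List String
  | [] => []
  | head :: tail => head :: (pvDedup tail).filter (fun r => r ≠ head)

-- [lookup[f] for f in flags if f in lookup]  (membership test + lookup = filterMap of get?)
def flags_to_actions_alt (flags : List String) (catalog : List (String × List (List (String × String)))) : List String :=
  let entries := (PySem.Dict.mk catalog).getD "flags" []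
  let lookup : PySem.Dict String String :=
    entries.foldl (fun d f => d.insert ((PySem.Dict.mk f).getD "id" "") ((PySem.Dict.mk f).getD "route" "")) PySem.Dict.empty
  let routes := flags.filterMap (fun f => lookup.get? f)
  pvDedup routes

-- ===== PRECONDITION & SPEC =====
-- Pre_ excludes exactly the inputs where Python A raises KeyError: catalog without a
-- 'flags' key, or an entry of catalog['flags'] without an 'id' or 'route' key.
def Pre_flags_to_actions (flags : List String) (catalog : List (String × List (List (String × String)))) : Prop :=
  (PySem.Dict.mk catalog).contains "flags" = true ∧
  ∀ f ∈ (PySem.Dict.mk catalog).getD "flags" [],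
    (PySem.Dict.mk f).contains "id" = true ∧ (PySem.Dict.mk f).contains "route" = true
instance (flags : List String) (catalog : List (String × List (List (String × String)))) : Decidable (Pre_flags_to_actions flags catalog) := by unfold Pre_flags_to_actions; infer_instance

def pvWitness_flags_to_actions : List String × (List (String × List (List (String × String)))) :=
  (["f1", "f2", "f1"], [("flags", [[("id", "f1"), ("route", "r1")], [("id", "f2"), ("route", "r1")]])])

def Spec_flags_to_actions (flags : List String) (catalog : List (String × List (List (String × String)))) (out : List String) : Prop := out = flags_to_actions_alt flags catalog
instance (flags : List String) (catalog : List (String × List (List (String × String)))) (out : List String) : Decidable (Spec_flags_to_actions flags catalog out) := by unfold Spec_flags_to_actions; infer_instance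

-- ===== CLAIM =====
def Claim_equal_flags_to_actions : Prop := ∀ (flags : List String) (catalog : List (String × List (List (String × String)))), Dom_flags_to_actions flags catalog → Pre_flags_to_actions flags catalog → Spec_flags_to_actions flags catalog (flags_to_actions flags catalog)

-- ===== LEMMAS AND PROOFS =====

-- A's per-flag match on get? = a plain fold over the resolved route list
theorem foldl_match_filterMap (flags : List String) (g : String → Option String)
    (step : List String × PySem.Set String → String → List String × PySem.Set String)
    (st : List String × PySem.Set String) :
    flags.foldl (fun st flagId => match g flagId with | some route => step st route | none => st) st
      = (flags.filterMap g).foldl step st := by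
  induction flags generalizing st with
  | nil => rfl
  | cons f t ih =>
      simp only [List.foldl_cons, List.filterMap_cons]
      cases g f <;> simp [ih]

-- A's seen-set fold, started from any (acc, s) with the seen set s, appends the
-- recursive dedup of the rest filtered by s
theorem foldl_seen_eq_dedup (l : List String) (acc : List String) (s : PySem.Set String) :
    (l.foldl (fun (st : List String × PySem.Set String) route =>
        if PySem.Set.contains st.2 route then st else (st.1 ++ [route], PySem.Set.add st.2 route)) (acc, s)).1
      = acc ++ (pvDedup l).filter (fun r => !PySem.Set.contains s r) := by
  induction l generalizing acc s with
  | nil => simp [pvDedup]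
  | cons r t ih =>
      simp only [List.foldl_cons, pvDedup, List.filter_cons]
      by_cases h : PySem.Set.contains s r = true
      · rw [if_pos h, ih]
        simp only [h, Bool.not_true, Bool.false_eq_true, if_false, List.filter_filter]
        congr 1
        apply List.filter_congr
        intro x _
        have hr : r ∈ s := (PySem.Set.contains_iff s r).mp h
        by_cases hx : x ∈ s
        · simp [hx]
        · have hxr : x ≠ r := fun he => hx (he ▸ hr)
          simp [hx, hxr]
      · rw [if_neg h, ih]
        have h' : PySem.Set.contains s r = false := by simpa using h
        simp only [h', Bool.not_false, if_true, List.append_assoc, List.singleton_append,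
          List.filter_filter]
        congr 2
        apply List.filter_congr
        intro x _
        have hadd : ∀ y, (y ∈ PySem.Set.add s r) ↔ (y ∈ s ∨ y = r) := fun y => PySem.Set.mem_add s r y
        by_cases hxr : x = r
        · subst hxr; simp [hadd]
        · simp [hadd, hxr]

-- ===== VERDICT =====
theorem flags_to_actions_spec : Claim_equal_flags_to_actions := by
  intro flags catalog _ _
  unfold Spec_flags_to_actions flags_to_actions flags_to_actions_alt
  simp only []
  rw [foldl_match_filterMap, foldl_seen_eq_dedup]
  simp [PySem.Set.empty, PySem.Set.contains]
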